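-- pv_equiv track=rewrite | github.com/dandaprathyusha/NLP_ML_experiments | dialog_data_intent_extraction/data_creation/tourist_code/denorm_create_data_intermediate.py | generator_denorm_all_user_none
-- ===== SOURCE A (Python) =====
-- def generator_denorm_all_user_none(denorm_all_user_none_list, denorm_all_user_place_list, denorm_all_user_type_list, tags_place_dict, tags_type_dict, all_sys_responses_list, silence_user):
--     for denorm_all_user_none_list_item in denorm_all_user_none_list:
--         for denorm_all_user_place_list_item in denorm_all_user_place_list:
--             for denorm_all_user_type_list_item in denorm_all_user_type_list:
--                 place_type = list()
--                 for key, value in tags_place_dict.items():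
--                     if key in denorm_all_user_place_list_item:
--                         place_type.append(value)
--                 for key, value in tags_type_dict.items():
--                     for item in value:
--                         if item in denorm_all_user_type_list_item:
--                             place_type.append(key)
--                 substory_list = list()
--                 itr = 1
--                 substory_list.append(
--                     str(itr) + ' ' + denorm_all_user_none_list_item + "\t" + all_sys_responses_list[0])
--                 itr += 1
--                 substory_list.append(
--                     str(itr) + ' ' + silence_user + "\t" + all_sys_responses_list[2])
--                 itr += 1
--                 substory_list.append(
--                     str(itr) + ' ' + denorm_all_user_place_list_item + "\t" + all_sys_responses_list[0])
--                 itr += 1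
--                 substory_list.append(
--                     str(itr) + ' ' + silence_user + "\t" + all_sys_responses_list[1])
--                 itr += 1
--                 substory_list.append(
--                     str(itr) + ' ' + denorm_all_user_type_list_item + "\t" + all_sys_responses_list[0])
--                 itr += 1
--                 substory_list.append(
--                     str(itr) + ' ' + silence_user + "\t" + all_sys_responses_list[3])
--                 itr += 1
--                 temp_string = str(itr) + ' ' + silence_user + '\tapi_call'
--                 for item in place_type:
--                     temp_string += ' ' + item
--                 substory_list.append(temp_string)
--                 k = '\n'.join(substory_list) + "\n\n"
-- #                output_file.write('\n'.join(substory_list) + "\n\n")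
--                 yield k
-- ===== SOURCE B (Python) =====
-- def generator_denorm_all_user_none(denorm_all_user_none_list, denorm_all_user_place_list, denorm_all_user_type_list, tags_place_dict, tags_type_dict, all_sys_responses_list, silence_user):
--     # Precompute tag lookups once instead of rescanning both dicts for every triple.
--     place_map = {p: [v for k, v in tags_place_dict.items() if k in p]
--                  for p in denorm_all_user_place_list}
--     type_map = {t: [k for k, vs in tags_type_dict.items() for it in vs if it in t]
--                 for t in denorm_all_user_type_list}
--     for n in denorm_all_user_none_list:
--         for p in denorm_all_user_place_list:
--             for t in denorm_all_user_type_list: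
--                 tags = place_map[p] + type_map[t]
--                 api = '7 ' + silence_user + '\tapi_call' + ''.join(' ' + x for x in tags)
--                 yield '\n'.join(['1 ' + n + '\t' + all_sys_responses_list[0],
--                                  '2 ' + silence_user + '\t' + all_sys_responses_list[2],
--                                  '3 ' + p + '\t' + all_sys_responses_list[0],
--                                  '4 ' + silence_user + '\t' + all_sys_responses_list[1],
--                                  '5 ' + t + '\t' + all_sys_responses_list[0],
--                                  '6 ' + silence_user + '\t' + all_sys_responses_list[3],
--                                  api]) + '\n\n'
-- ===== Notes on version B (the rewrite author's own statement) =====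
-- stated objective: faster
-- what changed: B precomputes, once per place/type item, the matching tag values/keys into two dicts before the triple loop, so the per-triple rescans of both tag dicts disappear; each substory is assembled as a literal 7-element list with constant line numbers instead of an itr counter with stepwise appends.
import Mathlib
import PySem

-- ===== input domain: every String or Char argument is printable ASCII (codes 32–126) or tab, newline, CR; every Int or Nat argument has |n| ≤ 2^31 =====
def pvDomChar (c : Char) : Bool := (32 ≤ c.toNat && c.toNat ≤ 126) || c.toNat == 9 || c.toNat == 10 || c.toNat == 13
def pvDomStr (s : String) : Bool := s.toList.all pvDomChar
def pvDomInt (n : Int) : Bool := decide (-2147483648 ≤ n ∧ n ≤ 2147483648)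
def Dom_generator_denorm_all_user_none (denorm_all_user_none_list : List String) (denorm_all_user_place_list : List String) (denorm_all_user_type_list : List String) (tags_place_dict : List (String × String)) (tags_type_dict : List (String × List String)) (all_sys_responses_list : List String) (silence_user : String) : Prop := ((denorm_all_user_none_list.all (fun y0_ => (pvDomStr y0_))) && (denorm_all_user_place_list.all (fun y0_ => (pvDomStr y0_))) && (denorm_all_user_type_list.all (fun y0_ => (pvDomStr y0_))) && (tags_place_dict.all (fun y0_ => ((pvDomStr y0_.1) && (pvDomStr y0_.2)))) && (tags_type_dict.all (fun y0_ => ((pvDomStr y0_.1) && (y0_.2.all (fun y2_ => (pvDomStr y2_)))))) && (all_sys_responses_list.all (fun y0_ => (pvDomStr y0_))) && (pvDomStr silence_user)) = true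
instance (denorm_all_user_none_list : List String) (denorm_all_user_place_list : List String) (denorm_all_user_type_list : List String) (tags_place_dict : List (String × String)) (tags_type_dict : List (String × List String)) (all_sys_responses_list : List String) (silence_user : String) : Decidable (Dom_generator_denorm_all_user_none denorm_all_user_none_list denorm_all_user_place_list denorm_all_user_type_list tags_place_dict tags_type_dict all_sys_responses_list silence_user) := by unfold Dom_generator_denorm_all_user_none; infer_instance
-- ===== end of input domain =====

-- B precomputes per-place/per-type tag lists once (dict join) instead of rescanning both tag
-- dicts for every (none, place, type) triple; return-value equivalence of the collected yields.

-- ===== PORT A =====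
-- the body of A's innermost loop: one yielded substory string
def pvBodyA (none_item place_item type_item : String) (tags_place_dict : List (String × String)) (tags_type_dict : List (String × List String)) (resp : List String) (silence_user : String) : String :=
  let place_type : List String :=
    tags_place_dict.foldl (fun acc kv => if PySem.Str.isIn kv.1 place_item then acc ++ [kv.2] else acc) []
  let place_type : List String :=
    tags_type_dict.foldl (fun acc kv =>
      kv.2.foldl (fun acc2 item => if PySem.Str.isIn item type_item then acc2 ++ [kv.1] else acc2) acc) place_type
  let itr : Int := 1
  let substory_list : List String := []
  let substory_list := substory_list ++ [PySem.Int.toStr itr ++ " " ++ none_item ++ "\t" ++ PySem.List.pyGetD resp 0 ""]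
  let itr := itr + 1
  let substory_list := substory_list ++ [PySem.Int.toStr itr ++ " " ++ silence_user ++ "\t" ++ PySem.List.pyGetD resp 2 ""]
  let itr := itr + 1
  let substory_list := substory_list ++ [PySem.Int.toStr itr ++ " " ++ place_item ++ "\t" ++ PySem.List.pyGetD resp 0 ""]
  let itr := itr + 1
  let substory_list := substory_list ++ [PySem.Int.toStr itr ++ " " ++ silence_user ++ "\t" ++ PySem.List.pyGetD resp 1 ""]
  let itr := itr + 1
  let substory_list := substory_list ++ [PySem.Int.toStr itr ++ " " ++ type_item ++ "\t" ++ PySem.List.pyGetD resp 0 ""]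
  let itr := itr + 1
  let substory_list := substory_list ++ [PySem.Int.toStr itr ++ " " ++ silence_user ++ "\t" ++ PySem.List.pyGetD resp 3 ""]
  let itr := itr + 1
  let temp_string := PySem.Int.toStr itr ++ " " ++ silence_user ++ "\tapi_call"
  let temp_string := place_type.foldl (fun s item => s ++ " " ++ item) temp_string
  let substory_list := substory_list ++ [temp_string]
  PySem.Str.join "\n" substory_list ++ "\n\n"

def generator_denorm_all_user_none (denorm_all_user_none_list : List String) (denorm_all_user_place_list : List String) (denorm_all_user_type_list : List String) (tags_place_dict : List (String × String)) (tags_type_dict : List (String × List String)) (all_sys_responses_list : List String) (silence_user : String) : List String :=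
  denorm_all_user_none_list.flatMap (fun none_item =>
    denorm_all_user_place_list.flatMap (fun place_item =>
      denorm_all_user_type_list.map (fun type_item =>
        pvBodyA none_item place_item type_item tags_place_dict tags_type_dict all_sys_responses_list silence_user)))

-- ===== PORT B =====
-- tag values whose key occurs as a substring of the place item (one scan of tags_place_dict)
def pvPlaceTags (tags_place_dict : List (String × String)) (p : String) : List String :=
  (tags_place_dict.filter (fun kv => PySem.Str.isIn kv.1 p)).map (fun kv => kv.2)

-- dict keys, once per matching member item occurring as a substring of the type item
def pvTypeTags (tags_type_dict : List (String × List String)) (t : String) : List String :=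
  tags_type_dict.flatMap (fun kv => (kv.2.filter (fun it => PySem.Str.isIn it t)).map (fun _ => kv.1))

-- the yielded string, assembled from the precomputed tag list
def pvLinesB (n p t : String) (tags : List String) (resp : List String) (silence_user : String) : String :=
  let api := "7 " ++ silence_user ++ "\tapi_call" ++ PySem.Str.join "" (tags.map (fun x => " " ++ x))
  PySem.Str.join "\n"
    ["1 " ++ n ++ "\t" ++ PySem.List.pyGetD resp 0 "",
     "2 " ++ silence_user ++ "\t" ++ PySem.List.pyGetD resp 2 "",
     "3 " ++ p ++ "\t" ++ PySem.List.pyGetD resp 0 "",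
     "4 " ++ silence_user ++ "\t" ++ PySem.List.pyGetD resp 1 "",
     "5 " ++ t ++ "\t" ++ PySem.List.pyGetD resp 0 "",
     "6 " ++ silence_user ++ "\t" ++ PySem.List.pyGetD resp 3 "",
     api] ++ "\n\n"

def generator_denorm_all_user_none_alt (denorm_all_user_none_list : List String) (denorm_all_user_place_list : List String) (denorm_all_user_type_list : List String) (tags_place_dict : List (String × String)) (tags_type_dict : List (String × List String)) (all_sys_responses_list : List String) (silence_user : String) : List String :=
  let place_map : PySem.Dict String (List String) :=
    denorm_all_user_place_list.foldl (fun d p => d.insert p (pvPlaceTags tags_place_dict p)) PySem.Dict.empty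
  let type_map : PySem.Dict String (List String) :=
    denorm_all_user_type_list.foldl (fun d t => d.insert t (pvTypeTags tags_type_dict t)) PySem.Dict.empty
  denorm_all_user_none_list.flatMap (fun n =>
    denorm_all_user_place_list.flatMap (fun p =>
      denorm_all_user_type_list.map (fun t =>
        pvLinesB n p t (place_map.getD p [] ++ type_map.getD t []) all_sys_responses_list silence_user)))

-- ===== PRECONDITION & SPEC =====
-- A raises IndexError iff all three item lists are nonempty while all_sys_responses_list has
-- fewer than 4 entries (B raises there too); Pre_ excludes exactly those inputs.
def Pre_generator_denorm_all_user_none (denorm_all_user_none_list : List String) (denorm_all_user_place_list : List String) (denorm_all_user_type_list : List String) (tags_place_dict : List (String × String)) (tags_type_dict : List (String × List String)) (all_sys_responses_list : List String) (silence_user : String) : Prop :=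
  denorm_all_user_none_list = [] ∨ denorm_all_user_place_list = [] ∨ denorm_all_user_type_list = [] ∨ 4 ≤ all_sys_responses_list.length
instance (denorm_all_user_none_list : List String) (denorm_all_user_place_list : List String) (denorm_all_user_type_list : List String) (tags_place_dict : List (String × String)) (tags_type_dict : List (String × List String)) (all_sys_responses_list : List String) (silence_user : String) : Decidable (Pre_generator_denorm_all_user_none denorm_all_user_none_list denorm_all_user_place_list denorm_all_user_type_list tags_place_dict tags_type_dict all_sys_responses_list silence_user) := by unfold Pre_generator_denorm_all_user_none; infer_instance

def pvWitness_generator_denorm_all_user_none : List String × List String × List String × (List (String × String)) × (List (String × List String)) × List String × String :=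
  (["hi there"], ["near the bridge"], ["thai food"], [("bridge", "R_place")], [("cuisine", ["thai", "food"])], ["ok", "noted", "sure", "calling api"], "<SILENCE>")

def Spec_generator_denorm_all_user_none (denorm_all_user_none_list : List String) (denorm_all_user_place_list : List String) (denorm_all_user_type_list : List String) (tags_place_dict : List (String × String)) (tags_type_dict : List (String × List String)) (all_sys_responses_list : List String) (silence_user : String) (out : List String) : Prop := out = generator_denorm_all_user_none_alt denorm_all_user_none_list denorm_all_user_place_list denorm_all_user_type_list tags_place_dict tags_type_dict all_sys_responses_list silence_user
instance (denorm_all_user_none_list : List String) (denorm_all_user_place_list : List String) (denorm_all_user_type_list : List String) (tags_place_dict : List (String × String)) (tags_type_dict : List (String × List String)) (all_sys_responses_list : List String) (silence_user : String) (out : List String) : Decidable (Spec_generator_denorm_all_user_none denorm_all_user_none_list denorm_all_user_place_list denorm_all_user_type_list tags_place_dict tags_type_dict all_sys_responses_list silence_user out) := by unfold Spec_generator_denorm_all_user_none; infer_instance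

-- ===== CLAIM (what is proved, stated in full; the proofs are below) =====
def Claim_equal_generator_denorm_all_user_none : Prop := ∀ (denorm_all_user_none_list : List String) (denorm_all_user_place_list : List String) (denorm_all_user_type_list : List String) (tags_place_dict : List (String × String)) (tags_type_dict : List (String × List String)) (all_sys_responses_list : List String) (silence_user : String), Dom_generator_denorm_all_user_none denorm_all_user_none_list denorm_all_user_place_list denorm_all_user_type_list tags_place_dict tags_type_dict all_sys_responses_list silence_user → Pre_generator_denorm_all_user_none denorm_all_user_none_list denorm_all_user_place_list denorm_all_user_type_list tags_place_dict tags_type_dict all_sys_responses_list silence_user → Spec_generator_denorm_all_user_none denorm_all_user_none_list denorm_all_user_place_list denorm_all_user_type_list tags_place_dict tags_type_dict all_sys_responses_list silence_user (generator_denorm_all_user_none denorm_all_user_none_list denorm_all_user_place_list denorm_all_user_type_list tags_place_dict tags_type_dict all_sys_responses_list silence_user)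

-- ===== LEMMAS AND PROOFS =====
theorem pv_str_ext {s t : String} (h : s.toList = t.toList) : s = t := by
  have := congrArg String.ofList h; simpa using this

theorem pv_flat_int (ls : List (List Char)) : (List.intersperse [] ls).flatten = ls.flatten := by
  induction ls with
  | nil => simp
  | cons x t ih => cases t <;> simp_all [List.intersperse]

theorem pv_join_nil_cons (a : String) (l : List String) :
    PySem.Str.join "" (a :: l) = a ++ PySem.Str.join "" l := by
  apply pv_str_ext
  simp [PySem.Str.join, PySem.Chars.join, List.intercalate, pv_flat_int]

theorem pv_flatMap_congr {α β : Type} {l : List α} {f g : α → List β}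
    (h : ∀ a ∈ l, f a = g a) : l.flatMap f = l.flatMap g := by
  induction l with
  | nil => rfl
  | cons a t ih => simp_all [List.flatMap_cons]

-- the api-line accumulation loop as a join
theorem pv_tag_fold (l : List String) (init : String) :
    l.foldl (fun s item => s ++ " " ++ item) init
      = init ++ PySem.Str.join "" (l.map (fun x => " " ++ x)) := by
  induction l generalizing init with
  | nil =>
    apply pv_str_ext
    simp [PySem.Str.join, PySem.Chars.join, List.intercalate]
  | cons a t ih =>
    rw [List.foldl_cons, ih, List.map_cons, pv_join_nil_cons]
    apply pv_str_ext
    simp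

-- the tags_type_dict double loop of A produces exactly pvTypeTags, appended
theorem pv_type_fold (tags_type_dict : List (String × List String)) (t : String) (acc : List String) :
    tags_type_dict.foldl (fun acc kv =>
        kv.2.foldl (fun acc2 item => if PySem.Str.isIn item t then acc2 ++ [kv.1] else acc2) acc) acc
      = acc ++ pvTypeTags tags_type_dict t := by
  induction tags_type_dict generalizing acc with
  | nil => simp [pvTypeTags]
  | cons kv rest ih =>
    rw [List.foldl_cons, ih]
    rw [PySem.List.foldl_append_if (fun item => PySem.Str.isIn item t) (fun _ => kv.1)]
    simp [pvTypeTags]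

-- lookups in a dict built by inserting f p for each p of the list
theorem pv_getD_foldl_insert_not_mem (f : String → List String) (l : List String)
    (d : PySem.Dict String (List String)) (q : String) (h : q ∉ l) :
    (l.foldl (fun d p => d.insert p (f p)) d).getD q [] = d.getD q [] := by
  induction l generalizing d with
  | nil => rfl
  | cons a t ih =>
    rw [List.foldl_cons, ih _ (fun hm => h (List.mem_cons_of_mem a hm))]
    rw [PySem.Dict.getD_insert]
    simp only [List.mem_cons, not_or] at h
    simp [h.1]

theorem pv_getD_foldl_insert_mem (f : String → List String) (l : List String)
    (d : PySem.Dict String (List String)) (q : String) (h : q ∈ l) :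
    (l.foldl (fun d p => d.insert p (f p)) d).getD q [] = f q := by
  induction l generalizing d with
  | nil => cases h
  | cons a t ih =>
    rw [List.foldl_cons]
    by_cases hq : q ∈ t
    · exact ih _ hq
    · have hqa : q = a := by
        rcases List.mem_cons.mp h with h1 | h2
        · exact h1
        · exact absurd h2 hq
      rw [pv_getD_foldl_insert_not_mem f t _ q hq, PySem.Dict.getD_insert]
      simp [hqa]

-- pointwise equality of the yielded strings
theorem pv_body_eq (n p t : String) (tags_place_dict : List (String × String))
    (tags_type_dict : List (String × List String)) (resp : List String) (sil : String) :
    pvBodyA n p t tags_place_dict tags_type_dict resp sil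
      = pvLinesB n p t (pvPlaceTags tags_place_dict p ++ pvTypeTags tags_type_dict t) resp sil := by
  simp only [pvBodyA, pvLinesB, List.nil_append]
  rw [PySem.List.foldl_append_if (fun kv => PySem.Str.isIn kv.1 p) (fun kv : String × String => kv.2)]
  rw [pv_type_fold, pv_tag_fold]
  simp only [List.nil_append, pvPlaceTags]
  have e1 : PySem.Int.toStr 1 ++ " " = ("1 " : String) := by decide
  have e2 : PySem.Int.toStr (1 + 1) ++ " " = ("2 " : String) := by decide
  have e3 : PySem.Int.toStr (1 + 1 + 1) ++ " " = ("3 " : String) := by decide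
  have e4 : PySem.Int.toStr (1 + 1 + 1 + 1) ++ " " = ("4 " : String) := by decide
  have e5 : PySem.Int.toStr (1 + 1 + 1 + 1 + 1) ++ " " = ("5 " : String) := by decide
  have e6 : PySem.Int.toStr (1 + 1 + 1 + 1 + 1 + 1) ++ " " = ("6 " : String) := by decide
  have e7 : PySem.Int.toStr (1 + 1 + 1 + 1 + 1 + 1 + 1) ++ " " = ("7 " : String) := by decide
  simp only [e1, e2, e3, e4, e5, e6, e7, List.cons_append, List.nil_append]

theorem generator_denorm_all_user_none_spec_aux
    (denorm_all_user_none_list denorm_all_user_place_list denorm_all_user_type_list : List String)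
    (tags_place_dict : List (String × String)) (tags_type_dict : List (String × List String))
    (all_sys_responses_list : List String) (silence_user : String) :
    generator_denorm_all_user_none denorm_all_user_none_list denorm_all_user_place_list denorm_all_user_type_list tags_place_dict tags_type_dict all_sys_responses_list silence_user
      = generator_denorm_all_user_none_alt denorm_all_user_none_list denorm_all_user_place_list denorm_all_user_type_list tags_place_dict tags_type_dict all_sys_responses_list silence_user := by
  unfold generator_denorm_all_user_none generator_denorm_all_user_none_alt
  apply pv_flatMap_congr
  intro n _
  apply pv_flatMap_congr
  intro p hp
  apply List.map_congr_left
  intro t ht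
  rw [pv_getD_foldl_insert_mem _ _ _ _ hp, pv_getD_foldl_insert_mem _ _ _ _ ht]
  exact pv_body_eq n p t tags_place_dict tags_type_dict all_sys_responses_list silence_user

-- ===== VERDICT (by name: the statement is the Claim_ definition above) =====
theorem generator_denorm_all_user_none_spec : Claim_equal_generator_denorm_all_user_none := by
  intro a b c d e f g _ _
  unfold Spec_generator_denorm_all_user_none
  exact generator_denorm_all_user_none_spec_aux a b c d e f g
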